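-- pv_equiv track=rewrite | github.com/PratamaRafi/waizly-tech-test | logicTest.py | min_max_sum
-- ===== SOURCE A (Python) =====
-- def min_max_sum(arr):
--     total_sum = sum(arr)
--     min_sum = float('inf')
--     max_sum = float('-inf')
--
--     for i in range(len(arr)):
--         total_sum -= arr[i]
--         current_sum = sum(arr[:i] + arr[i+1:])
--         min_sum = min(min_sum, current_sum)
--         max_sum = max(max_sum, current_sum)
--
--     return min_sum, max_sum
-- ===== SOURCE B (Python) =====
-- def min_max_sum(arr):
--     total = sum(arr)
--     return total - max(arr), total - min(arr)
-- ===== Notes on version B (the rewrite author's own statement) =====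
-- stated objective: faster
-- what changed: Instead of re-summing a rebuilt (n-1)-element list for every index, B computes the total once and uses that the leave-one-out sum is total - arr[i], so the minimum/maximum are total - max(arr) / total - min(arr).
-- outside the precondition, e.g. on min_max_sum([]): A returns (inf, -inf), B raises ValueError
import Mathlib
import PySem

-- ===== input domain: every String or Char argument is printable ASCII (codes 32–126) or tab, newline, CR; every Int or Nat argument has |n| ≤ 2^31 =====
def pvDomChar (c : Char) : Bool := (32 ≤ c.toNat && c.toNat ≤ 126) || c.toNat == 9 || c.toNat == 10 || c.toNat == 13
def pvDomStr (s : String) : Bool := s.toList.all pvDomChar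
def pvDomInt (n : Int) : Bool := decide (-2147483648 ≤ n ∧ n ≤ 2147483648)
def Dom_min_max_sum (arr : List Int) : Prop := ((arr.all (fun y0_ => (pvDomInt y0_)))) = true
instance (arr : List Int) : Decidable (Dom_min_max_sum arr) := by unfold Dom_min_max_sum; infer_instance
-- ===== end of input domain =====

-- B computes the total once and uses current_sum = total - arr[i], replacing A's per-index
-- re-summation of a rebuilt list (faster: asymptotic, O(n) vs O(n^2)).

-- ===== PORT A =====
-- min_sum / max_sum start as float('inf') / float('-inf'); modelled as Option Int with
-- none = "still infinite" (faithful: for nonempty arr the first iteration replaces them).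
def pyMinO (o : Option Int) (x : Int) : Option Int :=
  some (match o with | none => x | some m => min m x)

def pyMaxO (o : Option Int) (x : Int) : Option Int :=
  some (match o with | none => x | some m => max m x)

def min_max_sum (arr : List Int) : Int × Int :=
  let st := (PySem.List.pyRange 0 arr.length 1).foldl
    (fun (st : Int × Option Int × Option Int) i =>
      let ts := st.1 - PySem.List.pyGetD arr i 0
      let cs := (PySem.List.slice arr none (some i) ++ PySem.List.slice arr (some (i + 1)) none).sum
      (ts, pyMinO st.2.1 cs, pyMaxO st.2.2 cs))
    (arr.sum, none, none)
  (st.2.1.getD 0, st.2.2.getD 0)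

-- ===== PORT B =====
def min_max_sum_alt (arr : List Int) : Int × Int :=
  let total := arr.sum
  (total - (PySem.List.max? arr (fun x => x)).getD 0,
   total - (PySem.List.min? arr (fun x => x)).getD 0)

-- ===== PRECONDITION & SPEC =====
-- Pre_ excludes only the empty list: there A returns the floats (inf, -inf), not a pair of
-- ints, and B's max()/min() raise ValueError.
def Pre_min_max_sum (arr : List Int) : Prop := arr ≠ []
instance (arr : List Int) : Decidable (Pre_min_max_sum arr) := by unfold Pre_min_max_sum; infer_instance

def pvWitness_min_max_sum : List Int := [1, 2, 3]

def Spec_min_max_sum (arr : List Int) (out : Int × Int) : Prop := out = min_max_sum_alt arr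
instance (arr : List Int) (out : Int × Int) : Decidable (Spec_min_max_sum arr out) := by unfold Spec_min_max_sum; infer_instance

-- ===== CLAIM (what is proved, stated in full; the proofs are below) =====
def Claim_equal_min_max_sum : Prop := ∀ (arr : List Int), Dom_min_max_sum arr → Pre_min_max_sum arr → Spec_min_max_sum arr (min_max_sum arr)

-- ===== LEMMAS AND PROOFS =====

-- The leave-one-out slice sum equals total minus the i-th element, for i in range(len(arr)).
lemma cs_eq (arr : List Int) (i : Int) (h0 : 0 ≤ i) (h1 : i < arr.length) :
    (PySem.List.slice arr none (some i) ++ PySem.List.slice arr (some (i + 1)) none).sum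
      = arr.sum - PySem.List.pyGetD arr i 0 := by
  obtain ⟨k, rfl⟩ : ∃ k : Nat, i = (k : Int) := ⟨i.toNat, (Int.toNat_of_nonneg h0).symm⟩
  have hk : k < arr.length := by exact_mod_cast h1
  rw [PySem.List.slice_to_natCast]
  have : ((k : Int) + 1) = ((k + 1 : Nat) : Int) := by push_cast; ring
  rw [this, PySem.List.slice_from_natCast]
  rw [PySem.List.pyGetD_natCast, List.getD_eq_getElem arr 0 hk]
  have hdrop : arr.drop k = arr[k] :: arr.drop (k + 1) := List.drop_eq_getElem_cons hk
  have hsum : arr.sum = (arr.take k).sum + (arr[k] + (arr.drop (k + 1)).sum) := by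
    conv_lhs => rw [← List.take_append_drop k arr]
    rw [List.sum_append, hdrop, List.sum_cons]
  rw [List.sum_append]
  omega

-- The triple-state loop projects onto two independent option-folds over the cs values.
lemma loop_split (arr : List Int) :
    ∀ (idxs : List Int) (ts : Int) (mo Mo : Option Int),
      (idxs.foldl
        (fun (st : Int × Option Int × Option Int) i =>
          (st.1 - PySem.List.pyGetD arr i 0,
           pyMinO st.2.1 ((PySem.List.slice arr none (some i) ++ PySem.List.slice arr (some (i + 1)) none).sum),
           pyMaxO st.2.2 ((PySem.List.slice arr none (some i) ++ PySem.List.slice arr (some (i + 1)) none).sum)))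
        (ts, mo, Mo)).2
      = ((idxs.map (fun i =>
            (PySem.List.slice arr none (some i) ++ PySem.List.slice arr (some (i + 1)) none).sum)).foldl pyMinO mo,
         (idxs.map (fun i =>
            (PySem.List.slice arr none (some i) ++ PySem.List.slice arr (some (i + 1)) none).sum)).foldl pyMaxO Mo)
  | [], ts, mo, Mo => rfl
  | i :: rest, ts, mo, Mo => by
      simp only [List.foldl_cons, List.map_cons]
      exact loop_split arr rest _ _ _

-- Folding pyMinO / pyMaxO from a some-state is an ordinary running min / max.
lemma foldl_pyMinO (vs : List Int) : ∀ m : Int, vs.foldl pyMinO (some m) = some (vs.foldl min m) := by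
  induction vs with
  | nil => intro m; rfl
  | cons v t ih => intro m; simpa [pyMinO] using ih (min m v)

lemma foldl_pyMaxO (vs : List Int) : ∀ m : Int, vs.foldl pyMaxO (some m) = some (vs.foldl max m) := by
  induction vs with
  | nil => intro m; rfl
  | cons v t ih => intro m; simpa [pyMaxO] using ih (max m v)

-- Running min of (t - x) values is t minus the running max, and vice versa.
lemma foldl_min_sub (t : Int) (l : List Int) : ∀ a : Int, (l.map (fun x => t - x)).foldl min (t - a) = t - l.foldl max a := by
  induction l with
  | nil => intro a; rfl
  | cons x r ih =>
      intro a
      simp only [List.map_cons, List.foldl_cons]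
      rw [show min (t - a) (t - x) = t - max a x by omega]
      exact ih (max a x)

lemma foldl_max_sub (t : Int) (l : List Int) : ∀ a : Int, (l.map (fun x => t - x)).foldl max (t - a) = t - l.foldl min a := by
  induction l with
  | nil => intro a; rfl
  | cons x r ih =>
      intro a
      simp only [List.map_cons, List.foldl_cons]
      rw [show max (t - a) (t - x) = t - min a x by omega]
      exact ih (min a x)

-- ===== VERDICT (by name: the statement is the Claim_ definition above) =====
theorem min_max_sum_spec : Claim_equal_min_max_sum := by
  intro arr _ hpre
  obtain ⟨x, t, rfl⟩ : ∃ x t, arr = x :: t := by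
    cases arr with
    | nil => exact absurd rfl hpre
    | cons x t => exact ⟨x, t, rfl⟩
  set arr := x :: t with harr
  unfold Spec_min_max_sum
  simp only [min_max_sum, min_max_sum_alt]
  rw [loop_split arr _ arr.sum none none]
  -- the list of cs values is arr mapped through (total - ·)
  have hmap : (PySem.List.pyRange 0 arr.length 1).map (fun i =>
      (PySem.List.slice arr none (some i) ++ PySem.List.slice arr (some (i + 1)) none).sum)
      = arr.map (fun y => arr.sum - y) := by
    have h1 : (PySem.List.pyRange 0 arr.length 1).map (fun i =>
        (PySem.List.slice arr none (some i) ++ PySem.List.slice arr (some (i + 1)) none).sum)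
        = (PySem.List.pyRange 0 arr.length 1).map (fun i => arr.sum - PySem.List.pyGetD arr i 0) := by
      apply List.map_congr_left
      intro i hi
      rw [PySem.List.mem_pyRange_one] at hi
      exact cs_eq arr i hi.1 hi.2
    rw [h1, show (fun i => arr.sum - PySem.List.pyGetD arr i 0)
        = (fun y => arr.sum - y) ∘ (fun i => PySem.List.pyGetD arr i 0) from rfl,
      ← List.map_map, PySem.List.map_pyGetD_pyRange_zero']
  rw [hmap, harr]
  simp only [List.map_cons, List.foldl_cons, pyMinO, pyMaxO]
  rw [foldl_pyMinO, foldl_pyMaxO]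
  rw [show ((x : Int) :: t).sum - x = (x :: t).sum - x from rfl]
  rw [foldl_min_sub ((x :: t).sum) t x, foldl_max_sub ((x :: t).sum) t x]
  rw [PySem.List.max?_id_cons, PySem.List.min?_id_cons]
  rfl
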